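-- pv_equiv track=rewrite | github.com/Burnfireblaze/ai-travel-agent | ai_travel_agent/agents/nodes/intent_parser.py | _trim_fragment
-- ===== SOURCE A (Python) =====
-- def _trim_fragment(fragment: str) -> str:
--     frag = (fragment or "").strip()
--     if not frag:
--         return frag
--     lower = frag.lower()
--     stop_tokens = [
--         " dates",
--         " date",
--         " budget",
--         " for ",
--         " with ",
--         " interests",
--         " pace",
--         " please",
--         " include",
--         " give ",
--         " and ",
--     ]
--     cut = len(frag)
--     for token in stop_tokens:
--         idx = lower.find(token)
--         if idx != -1:
--             cut = min(cut, idx)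
--     frag = frag[:cut]
--     frag = frag.strip(" ,;:-")
--     return frag
-- ===== SOURCE B (Python) =====
-- def _trim_fragment(fragment: str) -> str:
--     frag = (fragment or "").strip()
--     if not frag:
--         return frag
--     stop = (
--         " dates", " date", " budget", " for ", " with ", " interests",
--         " pace", " please", " include", " give ", " and ",
--     )
--     lower = frag.lower()
--     cut = len(frag)
--     for i in range(len(lower)):
--         if any(lower.startswith(t, i) for t in stop):
--             cut = i
--             break
--     return frag[:cut].strip(" ,;:-")
-- ===== Notes on version B (the rewrite author's own statement) =====
-- stated objective: alternative
-- what changed: Replaces the per-token min-of-find loop (one full scan of the string per stop token) with a single left-to-right scan over positions that breaks at the first position where any stop token starts.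
import Mathlib
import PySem

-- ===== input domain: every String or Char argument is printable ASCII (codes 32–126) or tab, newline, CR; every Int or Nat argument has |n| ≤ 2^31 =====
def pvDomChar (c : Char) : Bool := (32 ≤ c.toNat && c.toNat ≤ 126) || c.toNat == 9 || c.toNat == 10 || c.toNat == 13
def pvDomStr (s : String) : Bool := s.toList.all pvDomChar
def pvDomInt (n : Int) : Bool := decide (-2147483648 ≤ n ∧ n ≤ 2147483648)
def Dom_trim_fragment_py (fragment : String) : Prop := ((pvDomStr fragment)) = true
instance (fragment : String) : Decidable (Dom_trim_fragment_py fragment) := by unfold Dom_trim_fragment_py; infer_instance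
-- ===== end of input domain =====

-- B replaces A's per-token min-of-find loop by a single left-to-right positional scan
-- that stops at the first position where any stop token starts (objective: alternative).

-- ===== PORT A =====
def stopTokensA : List String :=
  [" dates", " date", " budget", " for ", " with ", " interests",
   " pace", " please", " include", " give ", " and "]

def trim_fragment_py (fragment : String) : String :=
  let frag := PySem.Str.strip (if fragment = "" then "" else fragment)
  if frag = "" then frag
  else
    let lower := PySem.Str.lower frag
    let cut := stopTokensA.foldl
      (fun cut token =>
        let idx := PySem.Str.find lower token
        if idx ≠ -1 then min cut idx else cut)
      (PySem.Str.len frag)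
    let frag2 := PySem.Str.slice frag none (some cut)
    PySem.Str.stripChars frag2 " ,;:-"

-- ===== PORT B =====
def stopTokensB : List String :=
  [" dates", " date", " budget", " for ", " with ", " interests",
   " pace", " please", " include", " give ", " and "]

-- the scan 'for i in range(len(lower)): if any(lower.startswith(t, i) ...): cut = i; break'
-- as structural recursion over the suffixes of lower (startswith(t, i) = t is a prefix of the suffix)
def firstStop (s : List Char) : Nat :=
  match s with
  | [] => 0
  | c :: rest =>
    if stopTokensB.any (fun t => t.toList.isPrefixOf (c :: rest)) then 0
    else firstStop rest + 1

def trim_fragment_py_alt (fragment : String) : String :=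
  let frag := PySem.Str.strip fragment
  if frag = "" then frag
  else
    let cut := firstStop (PySem.Str.lower frag).toList
    PySem.Str.stripChars (PySem.Str.slice frag none (some (cut : Int))) " ,;:-"

-- ===== PRECONDITION & SPEC =====
def Spec_trim_fragment_py (fragment : String) (out : String) : Prop := out = trim_fragment_py_alt fragment
instance (fragment : String) (out : String) : Decidable (Spec_trim_fragment_py fragment out) := by unfold Spec_trim_fragment_py; infer_instance

-- ===== CLAIM (what is proved, stated in full; the proofs are below) =====
def Claim_equal_trim_fragment_py : Prop := ∀ (fragment : String), Dom_trim_fragment_py fragment → Spec_trim_fragment_py fragment (trim_fragment_py fragment)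

-- ===== LEMMAS AND PROOFS =====

-- abbreviation for A's fold over a token list
def foldCut (cs : List Char) (ts : List String) (init : Int) : Int :=
  ts.foldl
    (fun cut token =>
      let idx := PySem.Chars.find cs token.toList
      if idx ≠ -1 then min cut idx else cut)
    init

theorem foldCut_le_init (cs : List Char) (ts : List String) :
    ∀ init : Int, foldCut cs ts init ≤ init := by
  induction ts with
  | nil => intro init; simp [foldCut]
  | cons t ts ih =>
    intro init
    simp only [foldCut, List.foldl] at *
    refine le_trans (ih _) ?_
    split <;> simp

theorem foldCut_le_find (cs : List Char) (ts : List String) (t : String)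
    (ht : t ∈ ts) (hne : PySem.Chars.find cs t.toList ≠ -1) :
    ∀ init : Int, foldCut cs ts init ≤ PySem.Chars.find cs t.toList := by
  induction ts with
  | nil => cases ht
  | cons u ts ih =>
    intro init
    rcases List.mem_cons.mp ht with h | h
    · subst h
      simp only [foldCut, List.foldl, hne, if_pos, ne_eq, not_false_iff]
      refine le_trans (foldCut_le_init cs ts _) ?_
      simp
    · exact ih h _

theorem le_foldCut (cs : List Char) (ts : List String) (m : Int)
    (h : ∀ t ∈ ts, PySem.Chars.find cs t.toList ≠ -1 → m ≤ PySem.Chars.find cs t.toList) :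
    ∀ init : Int, m ≤ init → m ≤ foldCut cs ts init := by
  induction ts with
  | nil => intro init hi; simpa [foldCut] using hi
  | cons u ts ih =>
    intro init hi
    simp only [foldCut, List.foldl]
    refine ih (fun t ht hne => h t (List.mem_cons_of_mem _ ht) hne) _ ?_
    split
    · exact le_min hi (h u (List.mem_cons_self) (by assumption))
    · exact hi

theorem firstStop_le_length (s : List Char) : firstStop s ≤ s.length := by
  induction s with
  | nil => simp [firstStop]
  | cons c rest ih =>
    simp only [firstStop, List.length_cons]
    split
    · omega
    · omega

theorem firstStop_le_of_prefix (t : String) (ht : t ∈ stopTokensB) :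
    ∀ (s : List Char) (i : Nat), t.toList <+: s.drop i → firstStop s ≤ i := by
  intro s
  induction s with
  | nil => intro i _; simp [firstStop]
  | cons c rest ih =>
    intro i hpre
    cases i with
    | zero =>
      have : stopTokensB.any (fun u => u.toList.isPrefixOf (c :: rest)) = true := by
        refine List.any_eq_true.mpr ⟨t, ht, ?_⟩
        exact List.isPrefixOf_iff_prefix.mpr (by simpa using hpre)
      simp [firstStop, this]
    | succ i =>
      have h2 : t.toList <+: rest.drop i := by simpa using hpre
      simp only [firstStop]
      split
      · omega
      · exact Nat.succ_le_succ (ih i h2)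

theorem firstStop_spec (s : List Char) (h : firstStop s < s.length) :
    ∃ t ∈ stopTokensB, t.toList <+: s.drop (firstStop s) := by
  induction s with
  | nil => simp at h
  | cons c rest ih =>
    by_cases hq : stopTokensB.any (fun u => u.toList.isPrefixOf (c :: rest)) = true
    · rcases List.any_eq_true.mp hq with ⟨t, ht, hp⟩
      refine ⟨t, ht, ?_⟩
      have h0 : firstStop (c :: rest) = 0 := by simp [firstStop, hq]
      rw [h0]
      simpa using List.isPrefixOf_iff_prefix.mp hp
    · have h0 : firstStop (c :: rest) = firstStop rest + 1 := by
        simp [firstStop, hq]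
      rw [h0]
      have : firstStop rest < rest.length := by
        rw [h0] at h; simp at h; omega
      rcases ih this with ⟨t, ht, hp⟩
      exact ⟨t, ht, by simpa using hp⟩

theorem cut_eq (cs : List Char) :
    foldCut cs stopTokensA (cs.length : Int) = (firstStop cs : Nat) := by
  have hAB : stopTokensA = stopTokensB := rfl
  have hm_le : ∀ t ∈ stopTokensA, PySem.Chars.find cs t.toList ≠ -1 →
      (firstStop cs : Int) ≤ PySem.Chars.find cs t.toList := by
    intro t ht hne
    have hnn : 0 ≤ PySem.Chars.find cs t.toList :=
      (PySem.Chars.find_nonneg_iff cs t.toList).mpr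
        ((PySem.Chars.find_ne_neg_one_iff cs t.toList).mp hne)
    have hsp := PySem.Chars.find_spec hnn
    have hle := firstStop_le_of_prefix t (hAB ▸ ht) cs
      (PySem.Chars.find cs t.toList).toNat hsp.1
    omega
  rcases lt_or_ge (firstStop cs) cs.length with hlt | hge
  · rcases firstStop_spec cs hlt with ⟨t, ht, hp⟩
    -- t occurs at position firstStop cs, so find ≠ -1 and find = firstStop cs
    have hinf : t.toList <:+: cs := hp.isInfix.trans (List.drop_suffix _ cs).isInfix
    have hne : PySem.Chars.find cs t.toList ≠ -1 :=
      (PySem.Chars.find_ne_neg_one_iff cs t.toList).mpr hinf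
    have hnn : 0 ≤ PySem.Chars.find cs t.toList :=
      (PySem.Chars.find_nonneg_iff cs t.toList).mpr hinf
    have hsp := PySem.Chars.find_spec hnn
    have hfle : (PySem.Chars.find cs t.toList).toNat ≤ firstStop cs := by
      by_contra hgt
      exact hsp.2 (firstStop cs) (by omega) hp
    have hge2 : (firstStop cs : Int) ≤ PySem.Chars.find cs t.toList :=
      hm_le t (hAB ▸ ht) hne
    have hfeq : PySem.Chars.find cs t.toList = (firstStop cs : Int) := by omega
    refine le_antisymm ?_ ?_
    · have := foldCut_le_find cs stopTokensA t (hAB ▸ ht) hne (cs.length : Int)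
      omega
    · exact le_foldCut cs stopTokensA _ hm_le _ (by exact_mod_cast firstStop_le_length cs)
  · have heq : firstStop cs = cs.length := le_antisymm (firstStop_le_length cs) hge
    refine le_antisymm ?_ ?_
    · have := foldCut_le_init cs stopTokensA (cs.length : Int)
      omega
    · exact le_foldCut cs stopTokensA _ hm_le _ (by omega)

theorem length_lower (l : List Char) : (PySem.Chars.lower l).length = l.length := by
  simp [PySem.Chars.lower]

-- ===== VERDICT (by name: the statement is the Claim_ definition above) =====
theorem trim_fragment_py_spec : Claim_equal_trim_fragment_py := by
  intro fragment _
  unfold Spec_trim_fragment_py trim_fragment_py trim_fragment_py_alt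
  have hor : (if fragment = "" then "" else fragment) = fragment := by
    split <;> simp_all
  rw [hor]
  set frag := PySem.Str.strip fragment with hfrag
  by_cases h0 : frag = ""
  · simp [h0]
  · simp only [h0, if_false]
    have hcut : stopTokensA.foldl
        (fun cut token =>
          let idx := PySem.Str.find (PySem.Str.lower frag) token
          if idx ≠ -1 then min cut idx else cut)
        (PySem.Str.len frag)
        = ((firstStop (PySem.Str.lower frag).toList : Nat) : Int) := by
      have hcs : (PySem.Str.lower frag).toList = PySem.Chars.lower frag.toList := by
        simp [PySem.Str.lower]
      have hlen : PySem.Str.len frag = (((PySem.Str.lower frag).toList.length : Nat) : Int) := by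
        rw [hcs, length_lower, PySem.Str.len_eq]
      have h := cut_eq (PySem.Str.lower frag).toList
      simp only [foldCut] at h
      simp only [PySem.Str.find_eq, hlen]
      exact h
    rw [hcut]
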